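-- pv_equiv track=rewrite | github.com/deasek/excel-analysis-api | excel_analysis/api/utils.py | find_column_matches
-- ===== SOURCE A (Python) =====
-- from typing import List, Dict, Any
--
-- def find_column_matches(
--     headers: List[str], target_columns: List[str]
-- ) -> Dict[str, int]:
--     matches = {}
--     for target in target_columns:
--         for idx, header in enumerate(headers):
--             if header and target.lower() in header.lower():
--                 matches[target] = idx
--                 break
--     return matches
-- ===== SOURCE B (Python) =====
-- def find_column_matches(headers, target_columns):
--     # Inverted traversal: walk headers once (outer), record each target's first
--     # containing header; then emit in target order to match dict insertion order.
--     found = {}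
--     for idx, header in enumerate(headers):
--         if header:
--             hl = header.lower()
--             for target in target_columns:
--                 if target not in found and target.lower() in hl:
--                     found[target] = idx
--     return {t: found[t] for t in target_columns if t in found}
-- ===== Notes on version B (the rewrite author's own statement) =====
-- stated objective: alternative
-- what changed: B inverts the loop nesting: it walks headers once in the outer loop (lowering each header once) and targets in the inner loop with a not-yet-matched guard, then emits the collected matches in target order, instead of A's per-target rescan of all headers.
import Mathlib
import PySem

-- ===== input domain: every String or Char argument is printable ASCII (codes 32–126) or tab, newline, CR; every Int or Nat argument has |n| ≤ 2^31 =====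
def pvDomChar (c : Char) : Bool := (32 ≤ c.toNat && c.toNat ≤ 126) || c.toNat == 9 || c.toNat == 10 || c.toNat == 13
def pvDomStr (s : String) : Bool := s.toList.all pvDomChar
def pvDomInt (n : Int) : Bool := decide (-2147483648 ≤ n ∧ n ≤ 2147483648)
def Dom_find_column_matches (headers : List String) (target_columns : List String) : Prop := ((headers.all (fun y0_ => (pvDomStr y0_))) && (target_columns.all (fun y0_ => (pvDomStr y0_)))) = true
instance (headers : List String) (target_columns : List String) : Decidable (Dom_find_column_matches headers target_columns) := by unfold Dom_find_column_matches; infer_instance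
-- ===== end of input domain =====

-- B inverts the two loops (headers outer, targets inner with a not-yet-matched guard),
-- lowering each header once instead of once per target; objective: alternative traversal.

-- ===== PORT A =====
-- inner 'for idx, header in enumerate(headers): … break' of A
def pvAInner (t : String) (hs : List String) (idx : Int) (d : PySem.Dict String Int) : PySem.Dict String Int :=
  match hs with
  | [] => d
  | h :: rest =>
      if (h != "") && PySem.Str.isIn (PySem.Str.lower t) (PySem.Str.lower h) then
        d.insert t idx
      else
        pvAInner t rest (idx + 1) d

def find_column_matches (headers : List String) (target_columns : List String) : List (String × Int) :=
  (target_columns.foldl (fun d t => pvAInner t headers 0 d) PySem.Dict.empty).items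

-- ===== PORT B =====
-- inner 'for target in target_columns: …' of B
def pvBScan (idx : Int) (hl : String) (ts : List String) (d : PySem.Dict String Int) : PySem.Dict String Int :=
  ts.foldl (fun d t =>
    if (!(d.contains t)) && PySem.Str.isIn (PySem.Str.lower t) hl then d.insert t idx else d) d

-- outer 'for idx, header in enumerate(headers): …' of B
def pvBOuter (ts : List String) (hs : List String) (idx : Int) (d : PySem.Dict String Int) : PySem.Dict String Int :=
  match hs with
  | [] => d
  | h :: rest =>
      pvBOuter ts rest (idx + 1) (if h != "" then pvBScan idx (PySem.Str.lower h) ts d else d)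

def find_column_matches_alt (headers : List String) (target_columns : List String) : List (String × Int) :=
  let found := pvBOuter target_columns headers 0 PySem.Dict.empty
  (target_columns.foldl (fun acc t =>
    match found.get? t with
    | some i => acc.insert t i
    | none => acc) PySem.Dict.empty).items

-- ===== PRECONDITION & SPEC =====
def Spec_find_column_matches (headers : List String) (target_columns : List String) (out : List (String × Int)) : Prop := out = find_column_matches_alt headers target_columns
instance (headers : List String) (target_columns : List String) (out : List (String × Int)) : Decidable (Spec_find_column_matches headers target_columns out) := by unfold Spec_find_column_matches; infer_instance

-- ===== CLAIM (what is proved, stated in full; the proofs are below) =====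
def Claim_equal_find_column_matches : Prop := ∀ (headers : List String) (target_columns : List String), Dom_find_column_matches headers target_columns → Spec_find_column_matches headers target_columns (find_column_matches headers target_columns)

-- ===== LEMMAS AND PROOFS =====

-- the first index (from idx) of a non-empty header containing t (case-insensitively)
def pvFirst (t : String) (hs : List String) (idx : Int) : Option Int :=
  match hs with
  | [] => none
  | h :: rest =>
      if (h != "") && PySem.Str.isIn (PySem.Str.lower t) (PySem.Str.lower h) then some idx
      else pvFirst t rest (idx + 1)

theorem pvAInner_eq (t : String) (hs : List String) (idx : Int) (d : PySem.Dict String Int) :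
    pvAInner t hs idx d = match pvFirst t hs idx with
      | some i => d.insert t i
      | none => d := by
  induction hs generalizing idx with
  | nil => rfl
  | cons h rest ih =>
      simp only [pvAInner, pvFirst]
      split_ifs with hc
      · rfl
      · exact ih (idx + 1)

-- one header step of B's inner loop, for an abstract match predicate p
theorem pvScan_get? (p : String → Bool) (idx : Int) (ts : List String)
    (d : PySem.Dict String Int) (t : String) :
    (ts.foldl (fun d t => if (!d.contains t && p t) = true then d.insert t idx else d) d).get? t =
      if t ∈ ts ∧ d.get? t = none ∧ p t = true then some idx else d.get? t := by
  induction ts generalizing d with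
  | nil => simp
  | cons t' rest ih =>
      rw [List.foldl_cons, ih]
      by_cases ht : t = t'
      · subst ht
        cases hg : d.get? t with
        | some v =>
            have hc : d.contains t = true := by
              rw [PySem.Dict.contains_eq_isSome_get?, hg]; rfl
            have hb : (!d.contains t && p t) = false := by simp [hc]
            rw [hb]
            simp [hg]
        | none =>
            have hc : d.contains t = false := by
              rw [PySem.Dict.contains_eq_isSome_get?, hg]; rfl
            cases hp : p t with
            | true => simp [hc, PySem.Dict.get?_insert_self]
            | false => simp [hg]
      · have hd' : ((if (!d.contains t' && p t') = true then d.insert t' idx else d)).get? t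
            = d.get? t := by
          split_ifs with h
          · exact PySem.Dict.get?_insert_of_ne _ _ ht
          · rfl
        rw [hd']
        by_cases hr : t ∈ rest
        · simp [List.mem_cons, hr]
        · simp [List.mem_cons, ht, hr]

theorem pvBScan_eq (idx : Int) (hl : String) (ts : List String) (d : PySem.Dict String Int) :
    pvBScan idx hl ts d =
      ts.foldl (fun d t =>
        if (!d.contains t && PySem.Str.isIn (PySem.Str.lower t) hl) = true
        then d.insert t idx else d) d := rfl

theorem pvBOuter_get? (ts : List String) (hs : List String) (idx : Int)
    (d : PySem.Dict String Int) (t : String) (ht : t ∈ ts) :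
    (pvBOuter ts hs idx d).get? t =
      match d.get? t with
      | some v => some v
      | none => pvFirst t hs idx := by
  induction hs generalizing idx d with
  | nil =>
      simp only [pvBOuter, pvFirst]
      cases d.get? t <;> rfl
  | cons h rest ih =>
      simp only [pvBOuter, pvFirst]
      cases hne : (h != "") with
      | false =>
          rw [if_neg (by simp), ih]
          cases d.get? t with
          | some v => rfl
          | none => rw [if_neg (by simp)]
      | true =>
          rw [if_pos rfl, ih, pvBScan_eq,
              pvScan_get? (fun t => PySem.Str.isIn (PySem.Str.lower t) (PySem.Str.lower h)) idx ts d t]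
          simp only [Bool.true_and]
          cases hin : PySem.Str.isIn (PySem.Str.lower t) (PySem.Str.lower h) with
          | true =>
              cases hg : d.get? t with
              | none => simp [ht]
              | some v => simp
          | false =>
              cases hg : d.get? t with
              | some v => simp
              | none => simp

-- ===== VERDICT (by name: the statement is the Claim_ definition above) =====
theorem find_column_matches_spec : Claim_equal_find_column_matches := by
  intro headers target_columns _
  unfold Spec_find_column_matches find_column_matches find_column_matches_alt
  congr 1
  apply PySem.List.foldl_congr_mem
  intro acc t htmem
  rw [pvAInner_eq, pvBOuter_get? target_columns headers 0 PySem.Dict.empty t htmem]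
  rw [PySem.Dict.get?_empty]
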